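-- pv_equiv track=rewrite | github.com/Tata-kyogo/mens-beauty-agent | quality_check.py | check_cross_similarity
-- ===== SOURCE A (Python) =====
-- SIMILARITY_THRESHOLD = 0.5   # 50%以上の n-gram 重複で類似と判定
--
-- def ngram_similarity(a: str, b: str, n: int = 3) -> float:
--     """文字 n-gram による類似度（0.0〜1.0）"""
--     def ngrams(s):
--         return set(s[i:i + n] for i in range(len(s) - n + 1))
--     ng_a, ng_b = ngrams(a), ngrams(b)
--     if not ng_a or not ng_b:
--         return 0.0
--     return len(ng_a & ng_b) / min(len(ng_a), len(ng_b))
--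
-- def check_cross_similarity(posts: dict) -> list:
--     issues = []
--     keys = list(posts.keys())
--     for i in range(len(keys)):
--         for j in range(i + 1, len(keys)):
--             sim = ngram_similarity(posts[keys[i]], posts[keys[j]])
--             if sim >= SIMILARITY_THRESHOLD:
--                 issues.append(
--                     f"【{keys[i]}】と【{keys[j]}】が類似 ({sim:.0%})"
--                 )
--     return issues
-- ===== SOURCE B (Python) =====
-- SIMILARITY_THRESHOLD = 0.5
--
--
-- def check_cross_similarity(posts: dict) -> list:
--     # Build each post's character-3-gram set ONCE, then an inverted index
--     # gram -> positions; accumulate shared-gram counts per position pair and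
--     # emit from the original i<j loop so the output order matches.
--     keys = list(posts.keys())
--     gs = []
--     for k in keys:
--         s = posts[k]
--         gs.append({s[i:i + 3] for i in range(len(s) - 2)})
--     index = {}
--     for pos, g in enumerate(gs):
--         for t in g:
--             index[t] = index.get(t, []) + [pos]
--     shared = {}
--     for occ in index.values():
--         while occ:
--             head, occ = occ[0], occ[1:]
--             for other in occ:
--                 p = (head, other)
--                 shared[p] = shared.get(p, 0) + 1
--     sizes = [len(g) for g in gs]
--     issues = []
--     for i in range(len(keys)):
--         for j in range(i + 1, len(keys)):
--             m = min(sizes[i], sizes[j])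
--             sim = shared.get((i, j), 0) / m if m else 0.0
--             if sim >= SIMILARITY_THRESHOLD:
--                 issues.append(
--                     f"【{keys[i]}】と【{keys[j]}】が類似 ({sim:.0%})"
--                 )
--     return issues
-- ===== Notes on version B (the rewrite author's own statement) =====
-- stated objective: faster
-- what changed: B builds each post's character-3-gram set once, then counts shared grams per post pair through an inverted index (gram -> posts containing it) instead of recomputing both n-gram sets and intersecting them for every pair; it emits from the original i<j loop so order and the empty-set->0.0 case are preserved.
import Mathlib
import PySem

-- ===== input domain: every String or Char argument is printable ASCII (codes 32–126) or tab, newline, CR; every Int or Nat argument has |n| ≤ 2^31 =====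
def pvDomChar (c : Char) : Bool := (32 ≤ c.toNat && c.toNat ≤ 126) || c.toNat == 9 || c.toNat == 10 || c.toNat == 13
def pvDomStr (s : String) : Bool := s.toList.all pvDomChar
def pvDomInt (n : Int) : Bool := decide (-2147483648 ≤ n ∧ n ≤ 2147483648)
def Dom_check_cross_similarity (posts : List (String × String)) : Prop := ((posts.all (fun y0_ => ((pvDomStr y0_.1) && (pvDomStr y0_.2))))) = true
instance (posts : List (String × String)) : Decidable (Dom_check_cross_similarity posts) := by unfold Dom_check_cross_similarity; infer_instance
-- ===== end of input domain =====

-- B builds every post's 3-gram set once and counts shared grams through an inverted index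
-- instead of recomputing both sets per pair (objective: faster).
-- Python floats: similarities are ratios c/m of small naturals; the helpers pvRnd/pvExp/pvDiv/
-- pvMul100/pvPctRound/pvGeHalf model IEEE-754 double rounding, the '>= 0.5' test and the '.0%'
-- format EXACTLY on such ratios (validated against CPython); both ports share this float model.

-- round N/D to the nearest integer, ties to even (D > 0)
def pvRnd (N D : Nat) : Nat :=
  if D < 2 * (N % D) then N / D + 1
  else if 2 * (N % D) < D then N / D
  else if N / D % 2 == 0 then N / D else N / D + 1

-- floor of log2 (num/den), num > 0, den > 0
def pvExp (num den : Nat) : Int :=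
  let d : Int := (Nat.log2 num : Int) - (Nat.log2 den : Int)
  if (if 0 ≤ d then den * 2 ^ d.toNat ≤ num else den ≤ num * 2 ^ (-d).toNat) then d else d - 1

-- the IEEE-754 double nearest to num/den (den > 0), as (significand, binary exponent)
def pvDiv (num den : Nat) : Nat × Int :=
  if num == 0 then (0, 0)
  else
    let e := pvExp num den
    let s := if 0 ≤ 52 - e then pvRnd (num * 2 ^ (52 - e).toNat) den
             else pvRnd num (den * 2 ^ (e - 52).toNat)
    (s, e - 52)

-- the double nearest to 100 * f (the multiplication Python performs for the '%' format)
def pvMul100 (f : Nat × Int) : Nat × Int :=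
  if f.1 == 0 then (0, 0)
  else if 0 ≤ f.2 then pvDiv (f.1 * 100 * 2 ^ f.2.toNat) 1
  else pvDiv (f.1 * 100) (2 ^ (-f.2).toNat)

-- round the double f to an integer, ties to even (the '.0' part of the format)
def pvPctRound (f : Nat × Int) : Nat :=
  if 0 ≤ f.2 then f.1 * 2 ^ f.2.toNat else pvRnd f.1 (2 ^ (-f.2).toNat)

-- the double f compared with SIMILARITY_THRESHOLD = 0.5 (exactly representable)
def pvGeHalf (f : Nat × Int) : Bool :=
  if 0 ≤ f.2 + 1 then decide (1 ≤ f.1 * 2 ^ (f.2 + 1).toNat)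
  else decide (2 ^ (-(f.2 + 1)).toNat ≤ f.1)

-- f"【{ka}】と【{kb}】が類似 ({sim:.0%})"
def pvMsg (ka kb : String) (sim : Nat × Int) : String :=
  "【" ++ ka ++ "】と【" ++ kb ++ "】が類似 (" ++
    PySem.Int.toStr (pvPctRound (pvMul100 sim)) ++ "%)"

-- ===== PORT A =====
-- set(s[i:i+n] for i in range(len(s) - n + 1))
def pvNgrams (n : Int) (s : String) : PySem.Set String :=
  PySem.Set.ofList ((PySem.List.pyRange 0 (PySem.Str.len s - n + 1) 1).map
    (fun i => PySem.Str.slice s (some i) (some (i + n))))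

def ngram_similarity (a b : String) (n : Int) : Nat × Int :=
  let ng_a := pvNgrams n a
  let ng_b := pvNgrams n b
  if ng_a.isEmpty || ng_b.isEmpty then (0, 0)
  else pvDiv (PySem.Set.inter ng_a ng_b).length (min ng_a.length ng_b.length)

def check_cross_similarity (posts : List (String × String)) : List String :=
  let d := PySem.Dict.mk posts
  let keys := d.keys
  (PySem.List.pyRange 0 (keys.length : Int) 1).foldl (fun issues i =>
    (PySem.List.pyRange (i + 1) (keys.length : Int) 1).foldl (fun issues j =>
      let sim := ngram_similarity (d.getD (PySem.List.pyGetD keys i "") "")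
                                  (d.getD (PySem.List.pyGetD keys j "") "") 3
      if pvGeHalf sim then
        issues ++ [pvMsg (PySem.List.pyGetD keys i "") (PySem.List.pyGetD keys j "") sim]
      else issues) issues) []

-- ===== PORT B =====
-- {s[i:i+3] for i in range(len(s) - 2)}
def pvNgramsB (s : String) : PySem.Set String :=
  PySem.Set.ofList ((PySem.List.pyRange 0 (PySem.Str.len s - 2) 1).map
    (fun i => PySem.Str.slice s (some i) (some (i + 3))))

-- 'for pos, g in enumerate(gs): for t in g: index[t] = index.get(t, []) + [pos]'
def pvIndex (gs : List (PySem.Set String)) : PySem.Dict String (List Int) :=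
  (PySem.List.enumerate gs 0).foldl (fun ix p =>
    p.2.foldl (fun ix t => ix.modify t [] (fun occ => occ ++ [p.1])) ix) PySem.Dict.empty

-- 'while occ: head, occ = occ[0], occ[1:]; for other in occ: shared[p] = shared.get(p, 0) + 1'
def pvSharedPairs (sh : PySem.Dict (Int × Int) Int) (occ : List Int) :
    PySem.Dict (Int × Int) Int :=
  match occ with
  | [] => sh
  | head :: occ' =>
      pvSharedPairs (occ'.foldl (fun sh other =>
        sh.insert (head, other) (sh.getD (head, other) 0 + 1)) sh) occ'

def check_cross_similarity_alt (posts : List (String × String)) : List String :=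
  let d := PySem.Dict.mk posts
  let keys := d.keys
  let gs := keys.map (fun k => pvNgramsB (d.getD k ""))
  let shared := (pvIndex gs).values.foldl pvSharedPairs PySem.Dict.empty
  let sizes := gs.map (fun g => (g.length : Int))
  (PySem.List.pyRange 0 (keys.length : Int) 1).foldl (fun issues i =>
    (PySem.List.pyRange (i + 1) (keys.length : Int) 1).foldl (fun issues j =>
      let m := min (PySem.List.pyGetD sizes i 0) (PySem.List.pyGetD sizes j 0)
      let sim := if m == 0 then ((0, 0) : Nat × Int)
                 else pvDiv (shared.getD (i, j) 0).toNat m.toNat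
      if pvGeHalf sim then
        issues ++ [pvMsg (PySem.List.pyGetD keys i "") (PySem.List.pyGetD keys j "") sim]
      else issues) issues) []

-- ===== PRECONDITION & SPEC =====
-- A's parameter is a Python dict, whose keys are necessarily distinct; Pre_ states exactly that
-- dict-ness for the association-list encoding (it excludes no input an actual dict can produce).
def Pre_check_cross_similarity (posts : List (String × String)) : Prop :=
  (posts.map Prod.fst).Nodup
instance (posts : List (String × String)) : Decidable (Pre_check_cross_similarity posts) := by
  unfold Pre_check_cross_similarity; infer_instance

def pvWitness_check_cross_similarity : (List (String × String)) :=
  [("a", "hello world"), ("b", "hello worlds"), ("c", "xyz")]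

def Spec_check_cross_similarity (posts : List (String × String)) (out : List String) : Prop :=
  out = check_cross_similarity_alt posts
instance (posts : List (String × String)) (out : List String) :
    Decidable (Spec_check_cross_similarity posts out) := by
  unfold Spec_check_cross_similarity; infer_instance

-- ===== CLAIM (what is proved, stated in full; the proofs are below) =====
def Claim_equal_check_cross_similarity : Prop :=
  ∀ (posts : List (String × String)), Dom_check_cross_similarity posts →
    Pre_check_cross_similarity posts →
    Spec_check_cross_similarity posts (check_cross_similarity posts)

-- ===== LEMMAS AND PROOFS =====

-- increment step of the shared-pair counter
def pvIncr (sh : PySem.Dict (Int × Int) Int) (p : Int × Int) : PySem.Dict (Int × Int) Int :=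
  sh.insert p (sh.getD p 0 + 1)

-- all ordered pairs (earlier, later) of a list
def pvListPairs : List Int → List (Int × Int)
  | [] => []
  | h :: r => r.map (fun o => (h, o)) ++ pvListPairs r

theorem pv_foldl_foldl_flatMap {α β γ : Type} (l : List α) (f : α → List β) (g : γ → β → γ)
    (init : γ) :
    l.foldl (fun acc a => (f a).foldl g acc) init = (l.flatMap f).foldl g init := by
  induction l generalizing init with
  | nil => rfl
  | cons x xs ih => simp [List.foldl_append, ih]

theorem pvIndex_eq_foldl (gs : List (PySem.Set String)) :
    pvIndex gs = ((PySem.List.enumerate gs 0).flatMap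
        (fun p => p.2.map (fun t => (t, p.1)))).foldl
      (fun d q => d.modify q.1 [] (fun occ => occ ++ [q.2])) PySem.Dict.empty := by
  unfold pvIndex
  rw [← pv_foldl_foldl_flatMap]
  apply PySem.List.foldl_congr_mem
  intro acc p _
  rw [List.foldl_map]

theorem pv_filter_map_head (pos : Int) (g : PySem.Set String) (hg : g.Nodup) (t : String) :
    ((g.map (fun t' => (t', pos))).filter (fun q => q.1 == t)).map (fun q => q.2)
      = if g.contains t then [pos] else [] := by
  rw [List.filter_map, List.map_map]
  have : ((fun q : String × Int => q.1 == t) ∘ fun t' => (t', pos)) = (fun t' => t' == t) := rfl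
  rw [this, List.filter_beq]
  by_cases h : t ∈ g
  · simp [List.count_eq_one_of_mem hg h, h]
  · simp [List.count_eq_zero_of_not_mem h, h]

theorem pv_aux_filter (l : List (Int × PySem.Set String)) (h : ∀ p ∈ l, List.Nodup p.2)
    (t : String) :
    ((l.flatMap (fun p => p.2.map (fun t' => (t', p.1)))).filter (fun q => q.1 == t)).map
        (fun q => q.2)
      = (l.filter (fun p => p.2.contains t)).map (fun p => p.1) := by
  induction l with
  | nil => rfl
  | cons p l ih =>
      rw [List.flatMap_cons, List.filter_append, List.map_append,
        pv_filter_map_head p.1 p.2 (h p (List.mem_cons_self)) t,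
        ih (fun q hq => h q (List.mem_cons_of_mem _ hq))]
      by_cases hm : t ∈ p.2 <;> simp [hm]

theorem pvIndex_getD (gs : List (PySem.Set String)) (hg : ∀ g ∈ gs, List.Nodup g) (t : String) :
    (pvIndex gs).getD t [] =
      ((PySem.List.enumerate gs 0).filter (fun p => p.2.contains t)).map (fun p => p.1) := by
  rw [pvIndex_eq_foldl, PySem.Dict.getD_foldl_modify_append]
  rw [show (PySem.Dict.empty : PySem.Dict String (List Int)).getD t [] = [] from rfl]
  rw [List.nil_append]
  exact pv_aux_filter _ (fun p hp => by
    obtain ⟨k, hk, rfl⟩ := (PySem.List.mem_enumerate_iff _ _ _).mp hp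
    exact hg _ (gs.getElem_mem hk)) t

theorem pvIndex_keys_nodup (gs : List (PySem.Set String)) : (pvIndex gs).keys.Nodup := by
  rw [pvIndex_eq_foldl]
  exact PySem.Dict.nodup_keys_foldl_modify_key _ Prod.fst []
    (fun _ q => fun occ => occ ++ [q.2]) _ (by simp [PySem.Dict.keys_empty])

theorem pvIndex_keys_mem (gs : List (PySem.Set String)) (t : String) :
    t ∈ (pvIndex gs).keys ↔ ∃ g ∈ gs, t ∈ g := by
  rw [pvIndex_eq_foldl,
    PySem.Dict.keys_foldl_modify_key _ Prod.fst [] (fun _ q => fun occ => occ ++ [q.2])]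
  rw [show (PySem.Dict.empty : PySem.Dict String (List Int)).keys = [] from rfl,
    PySem.Set.update_nil_left, PySem.Set.mem_ofList]
  simp only [List.map_flatMap, List.mem_flatMap, List.map_map, List.mem_map,
    PySem.List.mem_enumerate_iff]
  constructor
  · rintro ⟨p, ⟨k, hk, rfl⟩, t', ht', rfl⟩
    exact ⟨gs[k], gs.getElem_mem hk, ht'⟩
  · rintro ⟨g, hgm, htg⟩
    obtain ⟨k, hk, rfl⟩ := List.mem_iff_getElem.mp hgm
    exact ⟨((0 : Int) + k, gs[k]), ⟨k, hk, rfl⟩, t, htg, rfl⟩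

theorem pv_mem_posList (gs : List (PySem.Set String)) (t : String) (i : Int) :
    (i ∈ ((PySem.List.enumerate gs 0).filter (fun p => p.2.contains t)).map
        (fun p => p.1)) ↔ ∃ k : Nat, ∃ _ : k < gs.length, i = (k : Int) ∧ t ∈ gs[k] := by
  simp only [List.mem_map, List.mem_filter, PySem.List.mem_enumerate_iff]
  constructor
  · rintro ⟨p, ⟨⟨k, hk, rfl⟩, hc⟩, rfl⟩
    exact ⟨k, hk, by simp, by simpa using hc⟩
  · rintro ⟨k, hk, rfl, htg⟩
    exact ⟨((0 : Int) + k, gs[k]), ⟨⟨k, hk, rfl⟩, by simpa using htg⟩, by simp⟩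

theorem pv_posList_pairwise (gs : List (PySem.Set String)) (t : String) :
    (((PySem.List.enumerate gs 0).filter (fun p => p.2.contains t)).map
      (fun p => p.1)).Pairwise (· < ·) := by
  exact List.pairwise_map.mpr
    ((PySem.List.pairwise_lt_enumerate gs 0).filter _)







theorem pvSharedPairs_eq (occ : List Int) (sh : PySem.Dict (Int × Int) Int) :
    pvSharedPairs sh occ = (pvListPairs occ).foldl pvIncr sh := by
  induction occ generalizing sh with
  | nil => rfl
  | cons h r ih =>
      rw [pvSharedPairs, ih, pvListPairs, List.foldl_append, List.foldl_map]
      rfl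

theorem pv_count_map_pair (h : Int) (r : List Int) (i j : Int) :
    (r.map (fun o => (h, o))).count (i, j) = if h = i then r.count j else 0 := by
  rw [List.count, List.countP_map]
  by_cases hi : h = i
  · subst hi
    rw [if_pos rfl, List.count]
    apply List.countP_congr
    intro o _
    simp [Function.comp, Prod.ext_iff]
  · rw [if_neg hi]
    apply List.countP_eq_zero.mpr
    intro o _
    simp [Prod.ext_iff]
    intro h'; exact absurd h' hi

theorem pv_count_listPairs (occ : List Int) (hp : occ.Pairwise (· < ·)) (i j : Int)
    (hij : i < j) :
    (pvListPairs occ).count (i, j) = if i ∈ occ ∧ j ∈ occ then 1 else 0 := by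
  induction occ with
  | nil => simp [pvListPairs]
  | cons h r ih =>
      have hhr : ∀ x ∈ r, h < x := fun x hx => (List.pairwise_cons.mp hp).1 x hx
      have hr : r.Pairwise (· < ·) := (List.pairwise_cons.mp hp).2
      have hnd : r.Nodup := hr.imp (fun {a b} hab => ne_of_lt hab)
      rw [pvListPairs, List.count_append, pv_count_map_pair, ih hr]
      by_cases hi : h = i
      · subst hi
        have hinotr : h ∉ r := fun hm => lt_irrefl h (hhr h hm)
        have hjne : j ≠ h := ne_of_gt hij
        rw [if_pos rfl, if_neg (fun hc => hinotr hc.1)]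
        by_cases hjr : j ∈ r
        · rw [List.count_eq_one_of_mem hnd hjr, if_pos ⟨List.mem_cons_self, List.mem_cons_of_mem _ hjr⟩]
        · rw [List.count_eq_zero_of_not_mem hjr, if_neg]
          rintro ⟨-, hjm⟩
          rcases List.mem_cons.mp hjm with h1 | h2
          · exact hjne h1
          · exact hjr h2
      · rw [if_neg hi]
        by_cases hir : i ∈ r
        · have hjh : j ≠ h := fun hjh => by
            have := hhr i hir; omega
          rw [Nat.zero_add]
          by_cases hjr : j ∈ r
          · rw [if_pos ⟨hir, hjr⟩,
              if_pos ⟨List.mem_cons_of_mem _ hir, List.mem_cons_of_mem _ hjr⟩]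
          · rw [if_neg (fun hc => hjr hc.2), if_neg]
            rintro ⟨-, hjm⟩
            rcases List.mem_cons.mp hjm with h1 | h2
            · exact hjh h1
            · exact hjr h2
        · rw [Nat.zero_add, if_neg (fun hc => hir hc.1), if_neg]
          rintro ⟨him, -⟩
          rcases List.mem_cons.mp him with h1 | h2
          · exact hi h1.symm
          · exact hir h2

theorem pv_sum_map_ite_nat {α : Type} (p : α → Bool) (xs : List α) :
    (xs.map (fun x => if p x then 1 else 0)).sum = xs.countP p := by
  induction xs with
  | nil => rfl
  | cons x l ih => by_cases h : p x <;> simp [h, ih, Nat.add_comm]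

theorem pv_count_flatMap {α β : Type} [BEq β] (l : List α) (f : α → List β) (v : β) :
    (l.flatMap f).count v = (l.map (fun a => (f a).count v)).sum := by
  induction l with
  | nil => rfl
  | cons x xs ih => simp [List.count_append, ih]

theorem pv_shared_getD (gs : List (PySem.Set String)) (hg : ∀ g ∈ gs, List.Nodup g)
    (i j : Nat) (hij : i < j) (hj : j < gs.length) :
    ((pvIndex gs).values.foldl pvSharedPairs PySem.Dict.empty).getD ((i : Int), (j : Int)) 0
      = ((pvIndex gs).keys.countP (fun t => decide (t ∈ gs[i]) && decide (t ∈ gs[j])) : Int) := by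
  have hi : i < gs.length := lt_trans hij hj
  -- flatten the per-occurrence pair loops into one counting fold
  have h1 : (pvIndex gs).values.foldl pvSharedPairs PySem.Dict.empty
      = ((pvIndex gs).values.flatMap pvListPairs).foldl pvIncr PySem.Dict.empty := by
    rw [← pv_foldl_foldl_flatMap]
    exact PySem.List.foldl_congr_mem _ _ _ _ (fun acc occ _ => pvSharedPairs_eq occ acc)
  rw [h1]
  have h2 := PySem.Dict.getD_foldl_insert_add_one
    ((pvIndex gs).values.flatMap pvListPairs) PySem.Dict.empty ((i : Int), (j : Int))
  rw [show (fun (d : PySem.Dict (Int × Int) Int) x => d.insert x (d.getD x 0 + 1)) = pvIncr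
    from rfl] at h2
  rw [h2, PySem.Dict.getD_empty, zero_add]
  -- values of the index are the occurrence lists of its keys
  have hvals : (pvIndex gs).values
      = (pvIndex gs).keys.map (fun t =>
          ((PySem.List.enumerate gs 0).filter (fun p => p.2.contains t)).map (fun p => p.1)) := by
    show ((pvIndex gs).items).map (fun p => p.2) = _
    rw [PySem.Dict.items_eq_map_keys (pvIndex gs) (pvIndex_keys_nodup gs) [], List.map_map]
    exact List.map_congr_left (fun t _ => by
      show (pvIndex gs).getD t [] = _
      exact pvIndex_getD gs hg t)
  rw [hvals, pv_count_flatMap, List.map_map]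
  have h3 : ∀ t ∈ (pvIndex gs).keys,
      ((fun occ => (pvListPairs occ).count ((i : Int), (j : Int))) ∘
        (fun t => ((PySem.List.enumerate gs 0).filter (fun p => p.2.contains t)).map
          (fun p => p.1))) t
      = if (decide (t ∈ gs[i]) && decide (t ∈ gs[j])) = true then 1 else 0 := by
    intro t _
    show (pvListPairs _).count _ = _
    rw [pv_count_listPairs _ (pv_posList_pairwise gs t) _ _ (by exact_mod_cast hij)]
    have hmi : ((i : Int) ∈ ((PySem.List.enumerate gs 0).filter
        (fun p => p.2.contains t)).map (fun p => p.1)) ↔ t ∈ gs[i] := by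
      rw [pv_mem_posList]
      constructor
      · rintro ⟨k, hk, hik, htk⟩
        have : k = i := by exact_mod_cast hik.symm
        subst this; exact htk
      · intro h; exact ⟨i, hi, rfl, h⟩
    have hmj : ((j : Int) ∈ ((PySem.List.enumerate gs 0).filter
        (fun p => p.2.contains t)).map (fun p => p.1)) ↔ t ∈ gs[j] := by
      rw [pv_mem_posList]
      constructor
      · rintro ⟨k, hk, hik, htk⟩
        have : k = j := by exact_mod_cast hik.symm
        subst this; exact htk
      · intro h; exact ⟨j, hj, rfl, h⟩
    by_cases hti : t ∈ gs[i] <;> by_cases htj : t ∈ gs[j]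
    · rw [if_pos ⟨hmi.mpr hti, hmj.mpr htj⟩, if_pos (by simp [hti, htj])]
    · rw [if_neg (fun hc => htj (hmj.mp hc.2)), if_neg (by simp [htj])]
    · rw [if_neg (fun hc => hti (hmi.mp hc.1)), if_neg (by simp [hti])]
    · rw [if_neg (fun hc => hti (hmi.mp hc.1)), if_neg (by simp [hti])]
  rw [List.map_congr_left h3, pv_sum_map_ite_nat]

theorem pv_countP_inter (gs : List (PySem.Set String)) (hg : ∀ g ∈ gs, List.Nodup g)
    (i j : Nat) (hi : i < gs.length) (hj : j < gs.length) :
    (pvIndex gs).keys.countP (fun t => decide (t ∈ gs[i]) && decide (t ∈ gs[j]))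
      = (PySem.Set.inter gs[i] gs[j]).length := by
  rw [List.countP_eq_length_filter]
  show _ = (List.filter (fun x => PySem.Set.contains gs[j] x) gs[i]).length
  have hperm : ((pvIndex gs).keys.filter
      (fun t => decide (t ∈ gs[i]) && decide (t ∈ gs[j]))).Perm
      (gs[i].filter (fun x => PySem.Set.contains gs[j] x)) := by
    rw [List.perm_ext_iff_of_nodup ((pvIndex_keys_nodup gs).filter _) ((hg _ (gs.getElem_mem hi)).filter _)]
    intro t
    simp only [List.mem_filter, Bool.and_eq_true, decide_eq_true_eq,
      PySem.Set.contains_iff, pvIndex_keys_mem]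
    constructor
    · rintro ⟨-, hti, htj⟩; exact ⟨hti, htj⟩
    · rintro ⟨hti, htj⟩; exact ⟨⟨gs[i], gs.getElem_mem hi, hti⟩, hti, htj⟩
  exact hperm.length_eq

-- ===== VERDICT (by name: the statement is the Claim_ definition above) =====
theorem pvNgrams_three (s : String) : pvNgrams 3 s = pvNgramsB s := by
  unfold pvNgrams pvNgramsB
  have h : PySem.Str.len s - 3 + 1 = PySem.Str.len s - 2 := by ring
  rw [h]

theorem check_cross_similarity_spec : Claim_equal_check_cross_similarity := by
  unfold Claim_equal_check_cross_similarity
  intro posts _ hpre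
  unfold Spec_check_cross_similarity
  simp only [check_cross_similarity, check_cross_similarity_alt]
  set d : PySem.Dict String String := PySem.Dict.mk posts with hd
  set keys := d.keys with hkeys
  set gs := keys.map (fun k => pvNgramsB (d.getD k "")) with hgs
  have hgnodup : ∀ g ∈ gs, List.Nodup g := by
    intro g hgm
    rw [hgs] at hgm
    obtain ⟨k, -, rfl⟩ := List.mem_map.mp hgm
    unfold pvNgramsB
    exact PySem.Set.nodup_ofList _
  have hglen : gs.length = keys.length := by rw [hgs, List.length_map]
  apply PySem.List.foldl_congr_mem
  intro acc i hi
  apply PySem.List.foldl_congr_mem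
  intro acc2 j hj
  obtain ⟨hi0, hiN⟩ := PySem.List.mem_pyRange_one.mp hi
  obtain ⟨hj0, hjN⟩ := PySem.List.mem_pyRange_one.mp hj
  obtain ⟨i', rfl⟩ : ∃ i' : Nat, i = (i' : Int) := ⟨i.toNat, (Int.toNat_of_nonneg hi0).symm⟩
  obtain ⟨j', rfl⟩ : ∃ j' : Nat, j = (j' : Int) := ⟨j.toNat, (Int.toNat_of_nonneg (by omega)).symm⟩
  have hiK : i' < keys.length := by omega
  have hjK : j' < keys.length := by omega
  have hilt : i' < gs.length := by omega
  have hjlt : j' < gs.length := by omega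
  have hij' : i' < j' := by omega
  have hki : PySem.List.pyGetD keys (i' : Int) "" = keys[i'] := by
    rw [PySem.List.pyGetD_natCast]
    exact List.getD_eq_getElem keys "" hiK
  have hkj : PySem.List.pyGetD keys (j' : Int) "" = keys[j'] := by
    rw [PySem.List.pyGetD_natCast]
    exact List.getD_eq_getElem keys "" hjK
  have hszi : PySem.List.pyGetD (gs.map (fun g => ((List.length g : Nat) : Int))) (i' : Int) 0
      = ((gs[i']'hilt).length : Int) := by
    rw [PySem.List.pyGetD_natCast,
      List.getD_eq_getElem _ _ (by rw [List.length_map]; omega), List.getElem_map]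
  have hszj : PySem.List.pyGetD (gs.map (fun g => ((List.length g : Nat) : Int))) (j' : Int) 0
      = ((gs[j']'hjlt).length : Int) := by
    rw [PySem.List.pyGetD_natCast,
      List.getD_eq_getElem _ _ (by rw [List.length_map]; omega), List.getElem_map]
  have hvi : gs[i']'hilt = pvNgramsB (d.getD (keys[i']'hiK) "") := by
    simp only [hgs, List.getElem_map]
  have hvj : gs[j']'hjlt = pvNgramsB (d.getD (keys[j']'hjK) "") := by
    simp only [hgs, List.getElem_map]
  have hshared : ((pvIndex gs).values.foldl pvSharedPairs PySem.Dict.empty).getD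
        ((i' : Int), (j' : Int)) 0
      = ((PySem.Set.inter (gs[i']'hilt) (gs[j']'hjlt)).length : Int) := by
    rw [pv_shared_getD gs hgnodup i' j' hij' hjlt,
      pv_countP_inter gs hgnodup i' j' hilt hjlt]
  rw [hki, hkj]
  suffices hss : ngram_similarity (d.getD (keys[i']'hiK) "") (d.getD (keys[j']'hjK) "") 3
      = (if (min (PySem.List.pyGetD (gs.map (fun g => ((List.length g : Nat) : Int))) (i' : Int) 0)
              (PySem.List.pyGetD (gs.map (fun g => ((List.length g : Nat) : Int))) (j' : Int) 0) == 0)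
         then ((0, 0) : Nat × Int)
         else pvDiv (((pvIndex gs).values.foldl pvSharedPairs PySem.Dict.empty).getD
             ((i' : Int), (j' : Int)) 0).toNat
           (min (PySem.List.pyGetD (gs.map (fun g => ((List.length g : Nat) : Int))) (i' : Int) 0)
             (PySem.List.pyGetD (gs.map (fun g => ((List.length g : Nat) : Int))) (j' : Int) 0)).toNat) by
    rw [hss]
  simp only [ngram_similarity]
  rw [pvNgrams_three, pvNgrams_three, ← hvi, ← hvj, hszi, hszj, hshared]
  by_cases hzi : (gs[i']'hilt) = [] <;>
    by_cases hzj : (gs[j']'hjlt) = [] <;>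
    simp [hzi, hzj, List.isEmpty_iff, Nat.min_eq_zero_iff, List.length_eq_zero_iff,
      ← Nat.cast_min, Int.toNat_natCast]
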